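-- pv_equiv track=rewrite | github.com/shubham-debug/Python-Programs | bubblesort(junecircuits).py | solvee
-- ===== SOURCE A (Python) =====
-- def solvee(a):
--     mn=a[0]
--     counter=0
--     for i in range(1,len(a)):
--         if(a[i]<mn):
--             counter+=1
--         mn=min(a[i],mn)
--     return counter
-- ===== SOURCE B (Python) =====
-- def solvee(a):
--     m = a[0]
--     pm = [m]
--     for x in a[1:]:
--         if x < m:
--             m = x
--         pm.append(m)
--     return sum(1 for prev, cur in zip(pm, pm[1:]) if cur < prev)
-- ===== Notes on version B (the rewrite author's own statement) =====
-- stated objective: alternative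
-- what changed: B builds the prefix-minimum table in one pass and then counts strict decreases between consecutive prefix minima in a second pairwise pass, instead of A's single loop that counts inline while tracking the running minimum; Pre_ excludes only the empty list, on which both raise IndexError.
import Mathlib
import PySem

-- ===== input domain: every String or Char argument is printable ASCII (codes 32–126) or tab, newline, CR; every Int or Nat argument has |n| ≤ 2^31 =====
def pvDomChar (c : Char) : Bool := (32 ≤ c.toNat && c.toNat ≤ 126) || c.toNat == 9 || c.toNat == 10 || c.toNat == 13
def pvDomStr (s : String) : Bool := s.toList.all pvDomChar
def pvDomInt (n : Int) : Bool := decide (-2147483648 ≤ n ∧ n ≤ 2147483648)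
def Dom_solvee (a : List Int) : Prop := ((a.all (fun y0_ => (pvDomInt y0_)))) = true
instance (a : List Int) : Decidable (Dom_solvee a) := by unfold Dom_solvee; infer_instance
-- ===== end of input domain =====

-- B builds the prefix-minimum table, then counts strict decreases between consecutive
-- prefix minima in a second pairwise pass (alternative decomposition; Pre_ excludes only
-- the empty list, on which both Pythons raise IndexError).

-- ===== PORT A =====
-- A: mn = a[0]; counter = 0; for i in range(1, len(a)): if a[i] < mn: counter += 1; mn = min(a[i], mn)
def solvee (a : List Int) : Int :=
  let mn : Int := PySem.List.pyGetD a 0 0      -- a[0]; in range under Pre_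
  let r := (PySem.List.pyRange 1 (a.length : Int) 1).foldl
    (fun (s : Int × Int) i =>
      let x := PySem.List.pyGetD a i 0
      let counter := if x < s.1 then s.2 + 1 else s.2
      (min x s.1, counter) ) (mn, 0)
  r.2

-- ===== PORT B =====
-- pm = [m]; for x in a[1:]: m updated, pm.append(m)   (built here by structural recursion)
def pvPrefixMins (m : Int) : List Int → List Int
  | [] => [m]
  | x :: t => m :: pvPrefixMins (if x < m then x else m) t

-- sum(1 for prev, cur in zip(pm, pm[1:]) if cur < prev)
def pvCountDec : List Int → Int
  | prev :: cur :: t => (if cur < prev then 1 else 0) + pvCountDec (cur :: t)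
  | _ => 0

def solvee_alt (a : List Int) : Int :=
  match a with
  | [] => 0                                   -- unreachable under Pre_ (Source B raises on [])
  | m :: rest => pvCountDec (pvPrefixMins m rest)

-- ===== PRECONDITION & SPEC =====
-- A raises IndexError on the empty list (so does B); Pre_ excludes exactly that input.
def Pre_solvee (a : List Int) : Prop := a ≠ []
instance (a : List Int) : Decidable (Pre_solvee a) := by unfold Pre_solvee; infer_instance
def pvWitness_solvee : List Int := [3, 1, 2, 0]
def Spec_solvee (a : List Int) (out : Int) : Prop := out = solvee_alt a
instance (a : List Int) (out : Int) : Decidable (Spec_solvee a out) := by unfold Spec_solvee; infer_instance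

-- ===== CLAIM (what is proved, stated in full; the proofs are below) =====
def Claim_equal_solvee : Prop := ∀ (a : List Int), Dom_solvee a → Pre_solvee a → Spec_solvee a (solvee a)

-- ===== LEMMAS AND PROOFS =====

-- ===== VERDICT (by name: the statement is the Claim_ definition above) =====
-- step function of A's loop, over the element
def pvStepA (s : Int × Int) (x : Int) : Int × Int :=
  (min x s.1, if x < s.1 then s.2 + 1 else s.2)

theorem pvCountDec_cons (p m : Int) (t : List Int) :
    pvCountDec (p :: pvPrefixMins m t) = (if m < p then 1 else 0) + pvCountDec (pvPrefixMins m t) := by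
  cases t <;> simp [pvPrefixMins, pvCountDec]

theorem pvLoop_eq (t : List Int) : ∀ (m c : Int),
    (t.foldl pvStepA (m, c)).2 = pvCountDec (pvPrefixMins m t) + c := by
  induction t with
  | nil => intro m c; simp [pvPrefixMins, pvCountDec]
  | cons x t ih =>
    intro m c
    simp only [List.foldl_cons, pvStepA]
    rw [ih]
    simp only [pvPrefixMins]
    rw [pvCountDec_cons]
    have hmin : min x m = if x < m then x else m := by
      rcases lt_or_ge x m with h | h
      · simp [min_eq_left h.le, h]
      · simp [min_eq_right h, not_lt.mpr h]
    rw [hmin]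
    split_ifs <;> omega

theorem solvee_spec : Claim_equal_solvee := by
  intro a _ hpre
  unfold Spec_solvee solvee solvee_alt
  match a, hpre with
  | m :: rest, _ =>
    simp only [PySem.List.pyGetD_zero_cons, List.length_cons]
    have hfold := PySem.List.foldl_pyRange_pyGetD (xs := m :: rest) (a := 1)
      (d := 0) (f := pvStepA) (init := (m, 0)) (by norm_num)
    have : (PySem.List.pyRange 1 ((m :: rest).length : Int) 1).foldl
        (fun (s : Int × Int) i =>
          let x := PySem.List.pyGetD (m :: rest) i 0
          let counter := if x < s.1 then s.2 + 1 else s.2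
          (min x s.1, counter)) (m, 0)
        = ((m :: rest).drop 1).foldl pvStepA (m, 0) := by
      simp only [PySem.List.len_eq, Int.toNat_one] at hfold
      exact hfold
    simp only [List.length_cons] at this
    rw [this]
    simp only [List.drop_one, List.tail_cons]
    rw [pvLoop_eq]
    omega
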